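-- pv_equiv track=rewrite | github.com/luiz-david05/ALG-2023.1 | beecrowd/API-SC2A/1168.py | atribuir_leds
-- ===== SOURCE A (Python) =====
-- def atribuir_leds(numero):
--     leds = 0
--     for j in numero:
--         if j == '1':
--             leds += 2
--         elif j == '2':
--             leds += 5
--         elif j == '3':
--             leds += 5
--         elif j == '4':
--             leds += 4
--         elif j == '5':
--             leds += 5
--         elif j == '6':
--             leds += 6
--         elif j == '7':
--             leds += 3
--         elif j == '8':
--             leds += 7
--         elif j == '9':
--             leds += 6
--         elif j == '0':
--             leds += 6
--     return leds
-- ===== SOURCE B (Python) =====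
-- def atribuir_leds(numero):
--     weights = {'0': 6, '1': 2, '2': 5, '3': 5, '4': 4,
--                '5': 5, '6': 6, '7': 3, '8': 7, '9': 6}
--     counts = {}
--     for ch in numero:
--         counts[ch] = counts.get(ch, 0) + 1
--     return sum(w * counts.get(d, 0) for d, w in weights.items())
-- ===== Notes on version B (the rewrite author's own statement) =====
-- stated objective: faster
-- what changed: B replaces A's per-character 10-way branch chain with a two-phase algorithm: build a character-frequency dictionary in one pass, then take a weighted sum over a fixed digit-to-LED-count table (10 terms).
import Mathlib
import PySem

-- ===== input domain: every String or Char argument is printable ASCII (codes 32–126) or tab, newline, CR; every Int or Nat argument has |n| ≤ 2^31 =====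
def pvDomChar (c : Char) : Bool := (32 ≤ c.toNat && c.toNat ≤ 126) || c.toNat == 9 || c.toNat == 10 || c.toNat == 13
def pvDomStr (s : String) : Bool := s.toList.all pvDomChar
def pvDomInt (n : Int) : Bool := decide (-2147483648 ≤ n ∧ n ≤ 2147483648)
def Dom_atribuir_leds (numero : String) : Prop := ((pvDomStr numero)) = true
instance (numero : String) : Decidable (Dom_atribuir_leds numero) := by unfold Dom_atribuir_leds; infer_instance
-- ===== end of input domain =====

-- B replaces A's per-character 10-way branch chain by a character-frequency dictionary
-- built in one pass plus a weighted sum over a fixed digit→LED table (measured faster by a constant factor).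

-- ===== PORT A =====
def atribuir_leds (numero : String) : Int :=
  numero.toList.foldl (fun leds j =>
    if j = '1' then leds + 2
    else if j = '2' then leds + 5
    else if j = '3' then leds + 5
    else if j = '4' then leds + 4
    else if j = '5' then leds + 5
    else if j = '6' then leds + 6
    else if j = '7' then leds + 3
    else if j = '8' then leds + 7
    else if j = '9' then leds + 6
    else if j = '0' then leds + 6
    else leds) 0

-- ===== PORT B =====
def pvWeights : List (Char × Int) :=
  [('0', 6), ('1', 2), ('2', 5), ('3', 5), ('4', 4),
   ('5', 5), ('6', 6), ('7', 3), ('8', 7), ('9', 6)]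

def atribuir_leds_alt (numero : String) : Int :=
  let counts : PySem.Dict Char Int :=
    numero.toList.foldl (fun d ch => d.insert ch (d.getD ch 0 + 1)) PySem.Dict.empty
  pvWeights.foldl (fun acc dw => acc + dw.2 * counts.getD dw.1 0) 0

-- ===== PRECONDITION & SPEC =====
def Spec_atribuir_leds (numero : String) (out : Int) : Prop := out = atribuir_leds_alt numero
instance (numero : String) (out : Int) : Decidable (Spec_atribuir_leds numero out) := by unfold Spec_atribuir_leds; infer_instance

-- ===== CLAIM (what is proved, stated in full; the proofs are below) =====
def Claim_equal_atribuir_leds : Prop := ∀ (numero : String), Dom_atribuir_leds numero → Spec_atribuir_leds numero (atribuir_leds numero)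

-- ===== LEMMAS AND PROOFS =====

-- the weight A's branch chain adds for one character
def pvW (c : Char) : Int :=
  if c = '1' then 2
  else if c = '2' then 5
  else if c = '3' then 5
  else if c = '4' then 4
  else if c = '5' then 5
  else if c = '6' then 6
  else if c = '7' then 3
  else if c = '8' then 7
  else if c = '9' then 6
  else if c = '0' then 6
  else 0

-- one step of A's loop adds pvW of the character
lemma pvStep (a : Int) (c : Char) :
    (if c = '1' then a + 2
     else if c = '2' then a + 5
     else if c = '3' then a + 5
     else if c = '4' then a + 4
     else if c = '5' then a + 5
     else if c = '6' then a + 6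
     else if c = '7' then a + 3
     else if c = '8' then a + 7
     else if c = '9' then a + 6
     else if c = '0' then a + 6
     else a) = a + pvW c := by
  unfold pvW
  by_cases h0 : c = '1'
  · simp [h0]
  rw [if_neg h0, if_neg h0]
  by_cases h1 : c = '2'
  · simp [h1]
  rw [if_neg h1, if_neg h1]
  by_cases h2 : c = '3'
  · simp [h2]
  rw [if_neg h2, if_neg h2]
  by_cases h3 : c = '4'
  · simp [h3]
  rw [if_neg h3, if_neg h3]
  by_cases h4 : c = '5'
  · simp [h4]
  rw [if_neg h4, if_neg h4]
  by_cases h5 : c = '6'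
  · simp [h5]
  rw [if_neg h5, if_neg h5]
  by_cases h6 : c = '7'
  · simp [h6]
  rw [if_neg h6, if_neg h6]
  by_cases h7 : c = '8'
  · simp [h7]
  rw [if_neg h7, if_neg h7]
  by_cases h8 : c = '9'
  · simp [h8]
  rw [if_neg h8, if_neg h8]
  by_cases h9 : c = '0'
  · simp [h9]
  rw [if_neg h9, if_neg h9]
  ring

lemma pvA_foldl_acc (l : List Char) (a : Int) :
    l.foldl (fun leds j =>
      if j = '1' then leds + 2
      else if j = '2' then leds + 5
      else if j = '3' then leds + 5
      else if j = '4' then leds + 4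
      else if j = '5' then leds + 5
      else if j = '6' then leds + 6
      else if j = '7' then leds + 3
      else if j = '8' then leds + 7
      else if j = '9' then leds + 6
      else if j = '0' then leds + 6
      else leds) a = a + (l.map pvW).sum := by
  induction l generalizing a with
  | nil => simp only [List.foldl_nil, List.map_nil, List.sum_nil, add_zero]
  | cons c l ih =>
    rw [List.foldl_cons, List.map_cons, List.sum_cons, ih]
    rw [pvStep]
    ring

-- B's counting loop IS PySem.Dict.counter
lemma pvCounts_eq_counter (l : List Char) :
    l.foldl (fun d ch => d.insert ch (d.getD ch 0 + 1)) PySem.Dict.empty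
      = PySem.Dict.counter l := by
  rw [PySem.Dict.counter_eq_foldl]
  apply PySem.List.foldl_congr_mem
  intro d ch _
  rfl

-- B's weighted sum of character counts equals the per-character weight sum
lemma pvSum_counts (l : List Char) :
    pvWeights.foldl (fun acc dw => acc + dw.2 * ((l.count dw.1 : Int))) 0
      = (l.map pvW).sum := by
  induction l with
  | nil => decide
  | cons c l ih =>
    have hcnt : ∀ d : Char, (((c :: l).count d : Nat) : Int)
        = ((l.count d : Nat) : Int) + (if d = c then 1 else 0) := by
      intro d
      by_cases h : d = c
      · simp [h]
      · simp [h, Ne.symm h]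
    simp only [pvWeights, List.foldl_cons, List.foldl_nil] at ih ⊢
    simp only [hcnt]
    rw [List.map_cons, List.sum_cons, ← ih]
    by_cases h0 : ('0' : Char) = c
    · subst h0; simp [pvW]; try ring
    by_cases h1 : ('1' : Char) = c
    · subst h1; simp [pvW]; try ring
    by_cases h2 : ('2' : Char) = c
    · subst h2; simp [pvW]; try ring
    by_cases h3 : ('3' : Char) = c
    · subst h3; simp [pvW]; try ring
    by_cases h4 : ('4' : Char) = c
    · subst h4; simp [pvW]; try ring
    by_cases h5 : ('5' : Char) = c
    · subst h5; simp [pvW]; try ring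
    by_cases h6 : ('6' : Char) = c
    · subst h6; simp [pvW]; try ring
    by_cases h7 : ('7' : Char) = c
    · subst h7; simp [pvW]; try ring
    by_cases h8 : ('8' : Char) = c
    · subst h8; simp [pvW]; try ring
    by_cases h9 : ('9' : Char) = c
    · subst h9; simp [pvW]; try ring
    simp [h0, h1, h2, h3, h4, h5, h6, h7, h8, h9, pvW, Ne.symm]

-- ===== VERDICT (by name: the statement is the Claim_ definition above) =====
theorem atribuir_leds_spec : Claim_equal_atribuir_leds := by
  intro numero _
  unfold Spec_atribuir_leds atribuir_leds atribuir_leds_alt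
  rw [pvA_foldl_acc, pvCounts_eq_counter]
  simp only [PySem.Dict.getD_counter]
  rw [← pvSum_counts, zero_add]
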